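-- pv_equiv track=rewrite | github.com/StarChenPy/mobile-robot-ros | src/mobile_robot2/mobile_robot/util/Util.py | add_blank_lines_between_top_level_blocks
-- ===== SOURCE A (Python) =====
-- def add_blank_lines_between_top_level_blocks(yaml_content: str) -> str:
--     """
--     在YAML的顶层键之间插入空白行以提高可读性
--     参数:
--         yaml_content: 原始YAML字符串内容
--     返回:
--         处理后的带空行的YAML字符串
--     """
--     lines = yaml_content.split('\n')
--     new_lines = []
--     first_top_key = True
--
--     for line in lines:
--         stripped = line.strip()
--         # 检测顶层键（非缩进行且包含冒号）
--         if stripped and ':' in stripped and not line.startswith(' '):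
--             if not first_top_key:
--                 new_lines.append('')  # 插入空行
--             else:
--                 first_top_key = False
--             new_lines.append(line)
--         else:
--             new_lines.append(line)
--
--     return '\n'.join(new_lines)
-- ===== SOURCE B (Python) =====
-- def add_blank_lines_between_top_level_blocks(yaml_content: str) -> str:
--     """Group lines into top-level blocks, then join the blocks with blank lines."""
--     def is_top_key(line):
--         stripped = line.strip()
--         return bool(stripped) and ':' in stripped and not line.startswith(' ')
--
--     blocks = [[]]
--     seen_key = False
--     for line in yaml_content.split('\n'):
--         if is_top_key(line) and seen_key:
--             blocks.append([line])
--         else: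
--             seen_key = seen_key or is_top_key(line)
--             blocks[-1].append(line)
--     return '\n\n'.join('\n'.join(block) for block in blocks)
-- ===== Notes on version B (the rewrite author's own statement) =====
-- stated objective: alternative
-- what changed: B groups the lines into top-level blocks (a list of line-lists, starting a new block at each top-level key after the first) and joins the per-block joins with a double newline separator, instead of A's single flat line list with a first-key flag that splices empty-string separators in.
import Mathlib
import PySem

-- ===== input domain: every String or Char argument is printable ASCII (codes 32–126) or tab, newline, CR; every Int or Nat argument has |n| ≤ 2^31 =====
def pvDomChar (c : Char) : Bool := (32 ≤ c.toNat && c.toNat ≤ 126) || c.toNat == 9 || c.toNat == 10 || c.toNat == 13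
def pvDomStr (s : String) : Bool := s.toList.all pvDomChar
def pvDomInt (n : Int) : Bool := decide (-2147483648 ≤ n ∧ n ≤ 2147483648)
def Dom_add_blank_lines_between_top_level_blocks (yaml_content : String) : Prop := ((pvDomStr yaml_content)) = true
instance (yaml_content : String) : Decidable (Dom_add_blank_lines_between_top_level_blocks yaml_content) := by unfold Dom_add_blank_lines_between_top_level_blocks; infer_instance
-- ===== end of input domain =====

-- B groups the lines into top-level blocks and joins the blocks with a blank
-- separator, instead of A's flat line list with a first-key flag splicing in
-- empty-string separators (objective: alternative decomposition, same cost).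

-- ===== PORT A =====
-- loop body of A: new_lines/first_top_key state, '' spliced in before each
-- top-level key except the first
def pvStepA (st : List String × Bool) (line : String) : List String × Bool :=
  let stripped := PySem.Str.strip line
  if !(stripped == "") && PySem.Str.isIn ":" stripped && !(PySem.Str.startswith line " ") then
    if st.2 then (st.1 ++ [line], false)
    else (st.1 ++ [""] ++ [line], st.2)
  else (st.1 ++ [line], st.2)

def add_blank_lines_between_top_level_blocks (yaml_content : String) : String :=
  let lines := (PySem.Str.split? yaml_content "\n").getD []   -- sep "\n" ≠ "": split? is exact here
  let st := lines.foldl pvStepA ([], true)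
  PySem.Str.join "\n" st.1

-- ===== PORT B =====
-- Source B's is_top_key
def isTopKey (line : String) : Bool :=
  let stripped := PySem.Str.strip line
  !(stripped == "") && PySem.Str.isIn ":" stripped && !(PySem.Str.startswith line " ")

-- Source B's blocks[-1].append(line)
def pvAppendLast {α : Type} (blocks : List (List α)) (x : α) : List (List α) :=
  match blocks with
  | [] => [[x]]
  | [b] => [b ++ [x]]
  | b :: bs => b :: pvAppendLast bs x

-- loop body of B: blocks/seen_key state
def pvStepB (st : List (List String) × Bool) (line : String) : List (List String) × Bool :=
  if isTopKey line && st.2 then (st.1 ++ [[line]], st.2)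
  else (pvAppendLast st.1 line, st.2 || isTopKey line)

def add_blank_lines_between_top_level_blocks_alt (yaml_content : String) : String :=
  let lines := (PySem.Str.split? yaml_content "\n").getD []
  let st := lines.foldl pvStepB ([[]], false)
  PySem.Str.join "\n\n" (st.1.map (PySem.Str.join "\n"))

-- ===== PRECONDITION & SPEC =====
def Spec_add_blank_lines_between_top_level_blocks (yaml_content : String) (out : String) : Prop := out = add_blank_lines_between_top_level_blocks_alt yaml_content
instance (yaml_content : String) (out : String) : Decidable (Spec_add_blank_lines_between_top_level_blocks yaml_content out) := by unfold Spec_add_blank_lines_between_top_level_blocks; infer_instance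

-- ===== CLAIM (what is proved, stated in full; the proofs are below) =====
def Claim_equal_add_blank_lines_between_top_level_blocks : Prop := ∀ (yaml_content : String), Dom_add_blank_lines_between_top_level_blocks yaml_content → Spec_add_blank_lines_between_top_level_blocks yaml_content (add_blank_lines_between_top_level_blocks yaml_content)

-- ===== LEMMAS AND PROOFS =====

-- flatten a block list the way A's flat line list looks: a separator element e
-- between consecutive blocks
def pvFlat {α : Type} (e : α) : List (List α) → List α
  | [] => []
  | b :: bs => b ++ bs.flatMap (fun blk => e :: blk)

theorem pvFlat_cons_cons {α : Type} (e : α) (b c : List α) (bs : List (List α)) :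
    pvFlat e (b :: c :: bs) = b ++ e :: pvFlat e (c :: bs) := by
  simp [pvFlat]

theorem pvFlat_append_single {α : Type} (e : α) (bs : List (List α)) (b' : List α)
    (h : bs ≠ []) : pvFlat e (bs ++ [b']) = pvFlat e bs ++ e :: b' := by
  obtain ⟨x, xs, rfl⟩ := List.exists_cons_of_ne_nil h
  simp [pvFlat]

theorem pvAppendLast_ne_nil {α : Type} (bs : List (List α)) (x : α) :
    pvAppendLast bs x ≠ [] := by
  cases bs with
  | nil => simp [pvAppendLast]
  | cons b bs => cases bs <;> simp [pvAppendLast]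

theorem pvFlat_appendLast {α : Type} (e : α) (x : α) :
    ∀ (bs : List (List α)), bs ≠ [] → pvFlat e (pvAppendLast bs x) = pvFlat e bs ++ [x]
  | [], h => absurd rfl h
  | [b], _ => by simp [pvAppendLast, pvFlat]
  | b :: c :: bs, _ => by
    have ih := pvFlat_appendLast e x (c :: bs) (by simp)
    have hne : pvAppendLast (c :: bs) x ≠ [] := pvAppendLast_ne_nil _ _
    obtain ⟨y, ys, hy⟩ := List.exists_cons_of_ne_nil hne
    calc pvFlat e (pvAppendLast (b :: c :: bs) x)
        = pvFlat e (b :: pvAppendLast (c :: bs) x) := by simp [pvAppendLast]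
      _ = b ++ e :: pvFlat e (pvAppendLast (c :: bs) x) := by
            rw [hy, pvFlat_cons_cons]
      _ = b ++ e :: (pvFlat e (c :: bs) ++ [x]) := by rw [ih]
      _ = pvFlat e (b :: c :: bs) ++ [x] := by rw [pvFlat_cons_cons]; simp

theorem pvAppendLast_blocks_ne_nil {α : Type} (x : α) :
    ∀ (bs : List (List α)), (∀ b ∈ bs, b = [] → False) →
      ∀ b ∈ pvAppendLast bs x, b = [] → False
  | [], _ => by simp [pvAppendLast]
  | [c], h => by simp [pvAppendLast]
  | c :: d :: bs, h => by
    intro b hb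
    simp only [pvAppendLast, List.mem_cons] at hb
    rcases hb with rfl | hb
    · exact h b (by simp)
    · exact pvAppendLast_blocks_ne_nil x (d :: bs) (fun b hb => h b (by simp [hb])) b hb

-- pvStepA's inline condition is exactly isTopKey (definitional)
theorem pvStepA_eq (st : List String × Bool) (line : String) :
    pvStepA st line
      = if isTopKey line then
          if st.2 then (st.1 ++ [line], false) else (st.1 ++ [""] ++ [line], st.2)
        else (st.1 ++ [line], st.2) := rfl

-- loop invariant: A's flat list is the flattening of B's block list, with
-- first_top_key = !seen_key
theorem pvLoop (lines : List String) :
    ∀ (blocks : List (List String)) (seen : Bool), blocks ≠ [] →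
      (∀ b ∈ blocks, b = [] → False) →
      (lines.foldl pvStepA (pvFlat "" blocks, !seen)).1
          = pvFlat "" ((lines.foldl pvStepB (blocks, seen)).1)
        ∧ (lines.foldl pvStepB (blocks, seen)).1 ≠ []
        ∧ (∀ b ∈ (lines.foldl pvStepB (blocks, seen)).1, b = [] → False) := by
  induction lines with
  | nil => intro blocks seen h hb; exact ⟨rfl, h, hb⟩
  | cons l ls ih =>
    intro blocks seen h hb
    simp only [List.foldl_cons]
    by_cases hk : isTopKey l = true
    · cases seen with
      | true =>
        have ha : pvStepA (pvFlat "" blocks, !true) l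
            = (pvFlat "" (blocks ++ [[l]]), !true) := by
          simp only [pvStepA, isTopKey] at hk ⊢
          rw [if_pos hk, pvFlat_append_single _ _ _ h]
          simp
        have hbs : pvStepB (blocks, true) l = (blocks ++ [[l]], true) := by
          simp [pvStepB, hk]
        rw [ha, hbs]
        exact ih (blocks ++ [[l]]) true (by simp) (by
          intro b hbm
          rcases List.mem_append.mp hbm with h1 | h1
          · exact hb b h1
          · simp at h1; simp [h1])
      | false =>
        have ha : pvStepA (pvFlat "" blocks, !false) l
            = (pvFlat "" (pvAppendLast blocks l), !true) := by
          simp only [pvStepA, isTopKey] at hk ⊢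
          rw [if_pos hk]
          simp [pvFlat_appendLast _ _ _ h]
        have hbs : pvStepB (blocks, false) l = (pvAppendLast blocks l, true) := by
          simp [pvStepB, hk]
        rw [ha, hbs]
        exact ih _ true (pvAppendLast_ne_nil _ _) (pvAppendLast_blocks_ne_nil _ _ hb)
    · have ha : pvStepA (pvFlat "" blocks, !seen) l
          = (pvFlat "" (pvAppendLast blocks l), !seen) := by
        simp only [pvStepA, isTopKey] at hk ⊢
        rw [if_neg hk, pvFlat_appendLast _ _ _ h]
      have hbs : pvStepB (blocks, seen) l = (pvAppendLast blocks l, seen) := by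
        simp [pvStepB, hk]
      rw [ha, hbs]
      exact ih _ seen (pvAppendLast_ne_nil _ _) (pvAppendLast_blocks_ne_nil _ _ hb)

-- joining with sep across xs ++ y :: ys splits at the boundary (xs nonempty)
theorem pvJoin_append_cons (sep : List Char) :
    ∀ (xs : List (List Char)) (y : List Char) (ys : List (List Char)), xs ≠ [] →
      PySem.Chars.join sep (xs ++ y :: ys)
        = PySem.Chars.join sep xs ++ sep ++ PySem.Chars.join sep (y :: ys)
  | [], _, _, h => absurd rfl h
  | [x], y, ys, _ => by
    rw [List.singleton_append, PySem.Chars.join_cons_cons, PySem.Chars.join_singleton]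
  | x :: x' :: xs, y, ys, _ => by
    have ih := pvJoin_append_cons sep (x' :: xs) y ys (by simp)
    simp only [List.cons_append] at ih
    simp only [List.cons_append]
    rw [PySem.Chars.join_cons_cons, ih, PySem.Chars.join_cons_cons sep x x' xs]
    simp [List.append_assoc]

-- the key fact: join "\n" over the flattened blocks = join "\n\n" over the
-- per-block joins (all blocks nonempty)
theorem pvJoin_flat :
    ∀ (bs : List (List (List Char))), bs ≠ [] → (∀ b ∈ bs, b = [] → False) →
      PySem.Chars.join ['\n'] (pvFlat [] bs)
        = PySem.Chars.join ['\n', '\n'] (bs.map (PySem.Chars.join ['\n']))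
  | [], h, _ => absurd rfl h
  | [b], _, _ => by
    simp [pvFlat, PySem.Chars.join_singleton]
  | b :: c :: bs, _, hb => by
    have hbne : b ≠ [] := fun hh => hb b (by simp) hh
    have hcne : c ≠ [] := fun hh => hb c (by simp) hh
    have ih := pvJoin_flat (c :: bs) (by simp) (fun x hx => hb x (by simp [hx]))
    have hfl : pvFlat ([] : List Char) (c :: bs) ≠ [] := by
      cases bs <;> simp [pvFlat, hcne]
    obtain ⟨y, ys, hy⟩ := List.exists_cons_of_ne_nil hfl
    rw [pvFlat_cons_cons, pvJoin_append_cons _ b _ _ hbne, hy,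
      PySem.Chars.join_cons_cons, ← hy, ih]
    simp only [List.map_cons]
    rw [PySem.Chars.join_cons_cons]
    simp [List.append_assoc]

theorem pvFlat_map {α β : Type} (f : α → β) (e : α) :
    ∀ (bs : List (List α)), (pvFlat e bs).map f = pvFlat (f e) (bs.map (List.map f))
  | [] => by simp [pvFlat]
  | b :: bs => by
    simp [pvFlat, List.map_flatMap, List.flatMap_map]

-- string-level version of pvJoin_flat
theorem pvJoin_flat_str (bs : List (List String)) (h : bs ≠ [])
    (hb : ∀ b ∈ bs, b = [] → False) :
    PySem.Str.join "\n" (pvFlat "" bs)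
      = PySem.Str.join "\n\n" (bs.map (PySem.Str.join "\n")) := by
  apply String.toList_inj.mp
  rw [PySem.Str.toList_join, PySem.Str.toList_join]
  have hs1 : ("\n" : String).toList = ['\n'] := by decide
  have hs2 : ("\n\n" : String).toList = ['\n', '\n'] := by decide
  have hs0 : ("" : String).toList = [] := by decide
  have h1 : (pvFlat "" bs).map String.toList
      = pvFlat ([] : List Char) (bs.map (List.map String.toList)) := by
    rw [pvFlat_map String.toList "" bs, hs0]
  have h2 : (bs.map (PySem.Str.join "\n")).map String.toList
      = (bs.map (List.map String.toList)).map (PySem.Chars.join ['\n']) := by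
    simp only [List.map_map]
    apply List.map_congr_left
    intro b _
    simp [Function.comp, PySem.Str.toList_join, hs1]
  rw [hs1, hs2, h1, h2]
  exact pvJoin_flat _ (by simpa using h)
    (by intro b hbm
        obtain ⟨b0, hb0, rfl⟩ := List.mem_map.mp hbm
        intro hnil
        exact hb b0 hb0 (List.map_eq_nil_iff.mp hnil))

-- the whole pipeline on an arbitrary line list
theorem pv_lines (lines : List String) :
    PySem.Str.join "\n" ((lines.foldl pvStepA ([], true)).1)
      = PySem.Str.join "\n\n"
          (((lines.foldl pvStepB ([[]], false)).1).map (PySem.Str.join "\n")) := by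
  cases lines with
  | nil => decide
  | cons l ls =>
    simp only [List.foldl_cons]
    have hA : pvStepA ([], true) l = (pvFlat "" [[l]], !(isTopKey l)) := by
      rw [pvStepA_eq]
      cases hk : isTopKey l <;> simp [pvFlat]
    have hB : pvStepB ([[]], false) l = ([[l]], isTopKey l) := by
      simp [pvStepB, pvAppendLast]
    rw [hA, hB]
    obtain ⟨he, h1, h2⟩ := pvLoop ls [[l]] (isTopKey l) (by simp) (by simp)
    rw [he]
    exact pvJoin_flat_str _ h1 h2

theorem pv_main (yaml_content : String) :
    add_blank_lines_between_top_level_blocks yaml_content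
      = add_blank_lines_between_top_level_blocks_alt yaml_content := by
  exact pv_lines ((PySem.Str.split? yaml_content "\n").getD [])

-- ===== VERDICT (by name: the statement is the Claim_ definition above) =====
theorem add_blank_lines_between_top_level_blocks_spec : Claim_equal_add_blank_lines_between_top_level_blocks := by
  intro y _
  exact pv_main y
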